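-- pv_equiv track=rewrite | github.com/HazyResearch/pdftotree | pdftotree/utils/lines_utils.py | extend_vertical_lines
-- ===== SOURCE A (Python) =====
-- TOLERANCE = 5
--
-- def extend_vertical_lines(horizontal_lines, tol=TOLERANCE):
--     widths = {}
--     for i, line in enumerate(horizontal_lines):
--         try:
--             widths[(line[1], line[3])] += [i]
--         except KeyError:
--             widths[(line[1], line[3])] = [i]
--     new_vertical_lines = []
--     for (x0, x1) in widths.keys():
--         if len(widths[(x0, x1)]) > 1:
--             lines = [horizontal_lines[i] for i in widths[(x0, x1)]]
--             y0 = min([h[0] for h in lines])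
--             y1 = max([h[2] for h in lines])
--             new_vertical_lines += [(y0, x0, y1, x0), (y0, x1, y1, x1)]
--     return new_vertical_lines
-- ===== SOURCE B (Python) =====
-- TOLERANCE = 5
--
-- def extend_vertical_lines(horizontal_lines, tol=TOLERANCE):
--     # One pass keeping running aggregates (count, min y0, max y1) per endpoint pair,
--     # instead of storing index lists and re-scanning them afterwards.
--     stats = {}
--     for line in horizontal_lines:
--         key = (line[1], line[3])
--         rec = stats.get(key)
--         if rec is None:
--             stats[key] = (1, line[0], line[2])
--         else:
--             stats[key] = (rec[0] + 1, min(rec[1], line[0]), max(rec[2], line[2]))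
--     out = []
--     for (x0, x1), (count, y0, y1) in stats.items():
--         if count > 1:
--             out += [(y0, x0, y1, x0), (y0, x1, y1, x1)]
--     return out
-- ===== Notes on version B (the rewrite author's own statement) =====
-- stated objective: alternative
-- what changed: Instead of storing per-key index lists and re-scanning the input to rebuild each group and take min/max, B keeps a running (count, min y0, max y1) aggregate per endpoint pair in one pass and emits directly from the aggregates.
import Mathlib
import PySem

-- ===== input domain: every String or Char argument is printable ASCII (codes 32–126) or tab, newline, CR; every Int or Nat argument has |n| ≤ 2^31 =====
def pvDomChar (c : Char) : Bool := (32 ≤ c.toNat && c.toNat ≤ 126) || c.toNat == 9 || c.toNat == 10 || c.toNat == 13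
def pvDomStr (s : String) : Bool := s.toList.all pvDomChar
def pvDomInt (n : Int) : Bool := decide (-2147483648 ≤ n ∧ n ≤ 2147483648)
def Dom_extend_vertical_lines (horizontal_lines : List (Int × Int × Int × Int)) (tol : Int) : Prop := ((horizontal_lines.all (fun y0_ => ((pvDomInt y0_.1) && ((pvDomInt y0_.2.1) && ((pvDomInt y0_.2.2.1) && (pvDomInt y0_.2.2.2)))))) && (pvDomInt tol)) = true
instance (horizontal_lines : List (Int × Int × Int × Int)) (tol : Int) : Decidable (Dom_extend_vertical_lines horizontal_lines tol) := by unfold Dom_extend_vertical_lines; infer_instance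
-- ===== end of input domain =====

-- B replaces A's per-key index lists (rebuilt into line groups by a second scan of the
-- input) with running (count, min y0, max y1) aggregates maintained in the single pass;
-- objective: alternative decomposition, same asymptotic cost.

-- ===== PORT A =====
-- A's grouping loop: try/except KeyError append of the index = dict.modify with default [].
-- In the emission loop the key comes from the dict and each stored index comes from
-- enumerate, so `.getD`'s defaults are never used (exact on all inputs).
def extend_vertical_lines (horizontal_lines : List (Int × Int × Int × Int)) (tol : Int) : List (Int × Int × Int × Int) :=
  let widths : PySem.Dict (Int × Int) (List Int) :=
    (PySem.List.enumerate horizontal_lines 0).foldl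
      (fun d p => d.modify (p.2.2.1, p.2.2.2.2) [] (fun v => v ++ [p.1])) PySem.Dict.empty
  widths.keys.foldl
    (fun acc k =>
      let idxs := widths.getD k []
      if idxs.length > 1 then
        let lines := idxs.map (fun i => (PySem.List.pyGet? horizontal_lines i).getD (0, 0, 0, 0))
        let y0 := (PySem.List.min? (lines.map (fun h => h.1)) (fun x => x)).getD 0
        let y1 := (PySem.List.max? (lines.map (fun h => h.2.2.1)) (fun x => x)).getD 0
        acc ++ [(y0, k.1, y1, k.1), (y0, k.2, y1, k.2)]
      else acc) []

-- ===== PORT B =====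
def extend_vertical_lines_alt (horizontal_lines : List (Int × Int × Int × Int)) (tol : Int) : List (Int × Int × Int × Int) :=
  let stats : PySem.Dict (Int × Int) (Int × Int × Int) :=
    horizontal_lines.foldl
      (fun d l =>
        match d.get? (l.2.1, l.2.2.2) with
        | some r => d.insert (l.2.1, l.2.2.2) (r.1 + 1, min r.2.1 l.1, max r.2.2 l.2.2.1)
        | none => d.insert (l.2.1, l.2.2.2) (1, l.1, l.2.2.1)) PySem.Dict.empty
  stats.items.foldl
    (fun acc p =>
      if p.2.1 > 1 then
        acc ++ [(p.2.2.1, p.1.1, p.2.2.2, p.1.1), (p.2.2.1, p.1.2, p.2.2.2, p.1.2)]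
      else acc) []

-- ===== PRECONDITION & SPEC =====
def Spec_extend_vertical_lines (horizontal_lines : List (Int × Int × Int × Int)) (tol : Int) (out : List (Int × Int × Int × Int)) : Prop := out = extend_vertical_lines_alt horizontal_lines tol
instance (horizontal_lines : List (Int × Int × Int × Int)) (tol : Int) (out : List (Int × Int × Int × Int)) : Decidable (Spec_extend_vertical_lines horizontal_lines tol out) := by unfold Spec_extend_vertical_lines; infer_instance

-- ===== CLAIM (what is proved, stated in full; the proofs are below) =====
def Claim_equal_extend_vertical_lines : Prop := ∀ (horizontal_lines : List (Int × Int × Int × Int)) (tol : Int), Dom_extend_vertical_lines horizontal_lines tol → Spec_extend_vertical_lines horizontal_lines tol (extend_vertical_lines horizontal_lines tol)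

-- ===== LEMMAS AND PROOFS =====

-- the grouping key of a horizontal line
def evlKey (l : Int × Int × Int × Int) : Int × Int := (l.2.1, l.2.2.2)

-- B's per-line update of an optional aggregate record
def evlVal (o : Option (Int × Int × Int)) (l : Int × Int × Int × Int) : Int × Int × Int :=
  match o with
  | some r => (r.1 + 1, min r.2.1 l.1, max r.2.2 l.2.2.1)
  | none => (1, l.1, l.2.2.1)

-- folding B's update over a whole group
def evlAgg (o : Option (Int × Int × Int)) (g : List (Int × Int × Int × Int)) : Option (Int × Int × Int) :=
  g.foldl (fun o l => some (evlVal o l)) o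

theorem evlStep_eq (d : PySem.Dict (Int × Int) (Int × Int × Int)) (l : Int × Int × Int × Int) :
    (match d.get? (l.2.1, l.2.2.2) with
     | some r => d.insert (l.2.1, l.2.2.2) (r.1 + 1, min r.2.1 l.1, max r.2.2 l.2.2.1)
     | none => d.insert (l.2.1, l.2.2.2) (1, l.1, l.2.2.1))
    = d.insert (evlKey l) (evlVal (d.get? (evlKey l)) l) := by
  cases h : d.get? (l.2.1, l.2.2.2) <;> simp [evlKey, evlVal, h]

theorem evlB_get? (hl : List (Int × Int × Int × Int)) (d : PySem.Dict (Int × Int) (Int × Int × Int)) (k : Int × Int) :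
    (hl.foldl (fun d l => d.insert (evlKey l) (evlVal (d.get? (evlKey l)) l)) d).get? k
      = evlAgg (d.get? k) (hl.filter (fun l => evlKey l == k)) := by
  induction hl generalizing d with
  | nil => simp [evlAgg]
  | cons l t ih =>
    simp only [List.foldl_cons, List.filter_cons]
    rw [ih, PySem.Dict.get?_insert]
    by_cases hk : evlKey l = k
    · subst hk
      simp [evlAgg]
    · simp [hk, Ne.symm hk]

theorem evlAgg_some (t : List (Int × Int × Int × Int)) (r : Int × Int × Int) :
    evlAgg (some r) t
      = some (r.1 + t.length,
              t.foldl (fun a l => min a l.1) r.2.1,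
              t.foldl (fun a l => max a l.2.2.1) r.2.2) := by
  induction t generalizing r with
  | nil => simp [evlAgg]
  | cons l t ih =>
    show evlAgg (some (evlVal (some r) l)) t = _
    rw [ih]
    simp only [evlVal, List.length_cons, List.foldl_cons]
    congr 2
    push_cast
    ring

-- each pair of enumerate indexes back into the list
theorem evl_pyGet_enum (hl : List (Int × Int × Int × Int)) (p : Int × (Int × Int × Int × Int))
    (hp : p ∈ PySem.List.enumerate hl 0) :
    (PySem.List.pyGet? hl p.1).getD (0, 0, 0, 0) = p.2 := by
  rcases (PySem.List.mem_enumerate_iff hl 0 p).mp hp with ⟨j, hj, rfl⟩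
  simp [PySem.List.pyGet?_natCast, List.getElem?_eq_getElem hj]

theorem evl_filter_snd {α : Type} (hl : List α) (s : Int) (q : α → Bool) :
    ((PySem.List.enumerate hl s).filter (fun p => q p.2)).map (fun p => p.2) = hl.filter q := by
  induction hl generalizing s with
  | nil => simp [PySem.List.enumerate_nil]
  | cons x t ih =>
    rw [PySem.List.enumerate_cons]
    by_cases hq : q x <;> simp [hq, ih]

-- A's reconstructed group for a key equals the plain filter of the input by that key
theorem evlA_lines (hl : List (Int × Int × Int × Int)) (k : Int × Int) :
    ((((PySem.List.enumerate hl 0).foldl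
        (fun d p => d.modify (p.2.2.1, p.2.2.2.2) [] (fun v => v ++ [p.1])) PySem.Dict.empty).getD k []).map
      (fun i => (PySem.List.pyGet? hl i).getD (0, 0, 0, 0)))
      = hl.filter (fun l => evlKey l == k) := by
  have hfold :
      ((PySem.List.enumerate hl 0).foldl
        (fun d p => d.modify (p.2.2.1, p.2.2.2.2) [] (fun v => v ++ [p.1])) PySem.Dict.empty)
      = (((PySem.List.enumerate hl 0).map (fun p => (evlKey p.2, p.1))).foldl
          (fun d q => d.modify q.1 [] (fun v => v ++ [q.2])) PySem.Dict.empty) := by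
    rw [List.foldl_map]; rfl
  rw [hfold, PySem.Dict.getD_foldl_modify_append, List.filter_map]
  simp only [PySem.Dict.getD_empty, List.nil_append, List.map_map]
  have hcomp : ((fun p : (Int × Int) × Int => p.1 == k) ∘ (fun p : Int × (Int × Int × Int × Int) => (evlKey p.2, p.1)))
      = fun p => evlKey p.2 == k := rfl
  rw [hcomp]
  have hfun : (((PySem.List.enumerate hl 0).filter (fun p => evlKey p.2 == k)).map
      ((fun i : Int => (PySem.List.pyGet? hl i).getD (0, 0, 0, 0)) ∘ ((fun x : (Int × Int) × Int => x.2) ∘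
        (fun p : Int × (Int × Int × Int × Int) => (evlKey p.2, p.1)))))
      = ((PySem.List.enumerate hl 0).filter (fun p => evlKey p.2 == k)).map (fun p => p.2) := by
    apply List.map_congr_left
    intro p hp
    exact evl_pyGet_enum hl p (List.mem_of_mem_filter hp)
  rw [hfun]
  exact evl_filter_snd hl 0 (fun l => evlKey l == k)

-- ===== VERDICT helper: the main equality =====
theorem evl_main (hl : List (Int × Int × Int × Int)) (tol : Int) :
    extend_vertical_lines hl tol = extend_vertical_lines_alt hl tol := by
  unfold extend_vertical_lines extend_vertical_lines_alt
  dsimp only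
  -- rewrite B's build loop into keyed-insert form
  have hstep : (fun (d : PySem.Dict (Int × Int) (Int × Int × Int)) (l : Int × Int × Int × Int) =>
      match d.get? (l.2.1, l.2.2.2) with
      | some r => d.insert (l.2.1, l.2.2.2) (r.1 + 1, min r.2.1 l.1, max r.2.2 l.2.2.1)
      | none => d.insert (l.2.1, l.2.2.2) (1, l.1, l.2.2.1))
      = fun d l => d.insert (evlKey l) (evlVal (d.get? (evlKey l)) l) := by
    funext d l; exact evlStep_eq d l
  rw [hstep]
  set dA := (PySem.List.enumerate hl 0).foldl
      (fun d p => d.modify (p.2.2.1, p.2.2.2.2) [] (fun v => v ++ [p.1])) PySem.Dict.empty with hdA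
  set dB := hl.foldl (fun d l => d.insert (evlKey l) (evlVal (d.get? (evlKey l)) l)) PySem.Dict.empty with hdB
  -- the two dicts list the same keys in the same order
  have hkeysA : dA.keys = PySem.Set.update [] (hl.map evlKey) := by
    rw [hdA]
    have := PySem.Dict.keys_foldl_modify_key (PySem.List.enumerate hl 0)
      (fun p => (p.2.2.1, p.2.2.2.2)) ([] : List Int)
      (fun _ p v => v ++ [p.1]) PySem.Dict.empty
    rw [this, PySem.Dict.keys_empty]
    congr 1
    have : (fun p : Int × (Int × Int × Int × Int) => (p.2.2.1, p.2.2.2.2))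
        = evlKey ∘ (fun p => p.2) := rfl
    rw [this, ← List.map_map, PySem.List.map_snd_enumerate]
  have hkeysB : dB.keys = PySem.Set.update [] (hl.map evlKey) := by
    rw [hdB, PySem.Dict.keys_foldl_insert_key hl evlKey
      (fun d l => evlVal (d.get? (evlKey l)) l) PySem.Dict.empty, PySem.Dict.keys_empty]
  have hnodupB : dB.keys.Nodup := by
    rw [hdB]
    exact PySem.Dict.nodup_keys_foldl_insert_key hl evlKey _ _ PySem.Dict.nodup_keys_empty
  -- B's items as a map over its keys, then both sides fold over the same key list
  rw [PySem.Dict.items_eq_map_keys dB hnodupB (0, 0, 0), List.foldl_map, hkeysA, hkeysB]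
  apply PySem.List.foldl_congr_mem
  intro acc k hk
  -- the group of input lines carrying key k is nonempty
  have hkmem : k ∈ hl.map evlKey := by
    have := (PySem.Set.mem_update ([] : PySem.Set (Int × Int)) (hl.map evlKey) k).mp hk
    simpa using this
  rcases List.mem_map.mp hkmem with ⟨l0, hl0, hkey⟩
  have hgmem : l0 ∈ hl.filter (fun l => evlKey l == k) := by
    simp [List.mem_filter, hl0, hkey]
  obtain ⟨x, t, hg⟩ : ∃ x t, hl.filter (fun l => evlKey l == k) = x :: t := by
    cases hgg : hl.filter (fun l => evlKey l == k) with
    | nil => rw [hgg] at hgmem; simp at hgmem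
    | cons x t => exact ⟨x, t, rfl⟩
  -- B's aggregate for k
  have hBget : dB.get? k = some (1 + (t.length : Int),
      t.foldl (fun a l => min a l.1) x.1,
      t.foldl (fun a l => max a l.2.2.1) x.2.2.1) := by
    rw [hdB, evlB_get? hl PySem.Dict.empty k, PySem.Dict.get?_empty, hg]
    show evlAgg (some (evlVal none x)) t = _
    rw [evlAgg_some]
    rfl
  have hBgetD : dB.getD k (0, 0, 0) = (1 + (t.length : Int),
      t.foldl (fun a l => min a l.1) x.1,
      t.foldl (fun a l => max a l.2.2.1) x.2.2.1) := by
    rw [PySem.Dict.getD_eq_get?_getD, hBget]; rfl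
  -- A's group for k
  have hA := evlA_lines hl k
  rw [hg] at hA
  simp only [← hdA] at hA
  rw [hBgetD, hA]
  -- compare the two emissions
  have hlen : (x :: t).length = t.length + 1 := by simp
  by_cases hgt : 0 < t.length
  · have h1 : ((dA.getD k []).length > 1) = True := by
      have : (dA.getD k []).length = (x :: t).length := by
        have := congrArg List.length hA
        simpa using this
      simp [this]; omega
    have h2 : ((1 + (t.length : Int)) > 1) = True := by simp; omega
    simp only [h1, h2, if_true]
    simp only [List.map_cons, PySem.List.min?_id_cons, PySem.List.max?_id_cons,
      Option.getD_some, List.foldl_map]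
  · have ht0 : t = [] := by cases t <;> simp_all
    subst ht0
    have h1 : ¬ ((dA.getD k []).length > 1) := by
      have : (dA.getD k []).length = 1 := by
        have := congrArg List.length hA
        simpa using this
      omega
    have h2 : ¬ ((1 + ((0 : Nat) : Int)) > 1) := by norm_num
    simp only [List.length_nil] at *
    simp [h1]

-- ===== VERDICT (by name: the statement is the Claim_ definition above) =====
theorem extend_vertical_lines_spec : Claim_equal_extend_vertical_lines := by
  intro hl tol _
  unfold Spec_extend_vertical_lines
  exact evl_main hl tol
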